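-- pv_equiv track=rewrite | github.com/stratosphereips/StratosphereLinuxIPS | modules/flowmldetection/plot_testing_performance.py | _choose_sparse_xticks
-- ===== SOURCE A (Python) =====
-- def _choose_sparse_xticks(batch_count, labels):
--     """
--     Always return numeric positions for xticks (0..batch_count-1) as the first
--     element. The second element is a list of labels where only a limited set
--     of positions contain text (sparse labels); other positions are "".
--
--     This prevents accidental use of string labels as x coordinates.
--     """
--     # full numeric positions for plotting (monotonic)
--     positions = list(range(batch_count))
--
--     if batch_count <= 20:
--         # keep all labels for small series
--         return positions, labels
--
--     max_labels = 15
--     step = max(1, batch_count // max_labels)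
--     indices = list(range(0, batch_count, step))
--     if indices[-1] != batch_count - 1:
--         indices.append(batch_count - 1)
--
--     sparse_labels = [""] * batch_count
--     for i in indices:
--         # guard: labels might be shorter than batch_count
--         if i < len(labels):
--             sparse_labels[i] = labels[i]
--         else:
--             sparse_labels[i] = str(i)
--
--     # NOTE: first element is the full numeric positions (not the sparse indices)
--     return positions, sparse_labels
-- ===== SOURCE B (Python) =====
-- def _choose_sparse_xticks(batch_count, labels):
--     positions = list(range(batch_count))
--     if batch_count <= 20:
--         return positions, labels
--     step = max(1, batch_count // 15)
--
--     def text_at(i):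
--         return labels[i] if i < len(labels) else str(i)
--
--     # emit the labels segment by segment: each tick followed by its run of blanks
--     out = []
--     i = 0
--     while i < batch_count:
--         out.append(text_at(i))
--         out.extend([""] * (min(step, batch_count - i) - 1))
--         i += step
--     # the last position gets a label even when it is not on the step grid
--     if (batch_count - 1) % step != 0:
--         out[-1] = text_at(batch_count - 1)
--     return positions, out
-- ===== Notes on version B (the rewrite author's own statement) =====
-- stated objective: alternative
-- what changed: Replaces A's prefill-and-scatter (build a sparse index list with a last-tick append, write into a [""]*batch_count buffer) by a segment emitter: a single while-loop over tick positions that appends each tick's label followed by its run of blanks, then relabels the last slot if it is off the step grid.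
import Mathlib
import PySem

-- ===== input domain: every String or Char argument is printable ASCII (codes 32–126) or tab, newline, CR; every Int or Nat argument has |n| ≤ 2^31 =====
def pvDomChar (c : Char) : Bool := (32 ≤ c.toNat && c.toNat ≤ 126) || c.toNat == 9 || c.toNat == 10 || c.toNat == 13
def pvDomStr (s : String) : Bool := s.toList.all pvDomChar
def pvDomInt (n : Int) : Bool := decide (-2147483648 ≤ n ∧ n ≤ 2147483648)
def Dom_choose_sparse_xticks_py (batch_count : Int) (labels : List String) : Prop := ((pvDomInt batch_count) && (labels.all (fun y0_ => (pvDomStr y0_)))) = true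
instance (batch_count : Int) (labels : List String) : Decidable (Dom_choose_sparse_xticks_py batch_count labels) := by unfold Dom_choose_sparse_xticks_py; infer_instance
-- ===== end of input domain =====

-- B replaces A's prefill-and-scatter (sparse index list + writes into a [""]*n buffer) with a
-- segment emitter: one loop over tick positions appending each label and its run of blanks,
-- then a fix-up of the last slot; objective: alternative (same cost, different algorithm).

-- ===== PORT A =====
def choose_sparse_xticks_py (batch_count : Int) (labels : List String) : List Int × List String :=
  let positions := PySem.List.pyRange 0 batch_count 1
  if batch_count ≤ 20 then
    (positions, labels)
  else
    let step := max 1 (PySem.Int.floordiv batch_count 15)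
    let indices0 := PySem.List.pyRange 0 batch_count step
    -- indices[-1]: indices0 is nonempty here (batch_count > 20), so getLast?.getD is exact
    let indices := if (indices0.getLast?.getD 0) ≠ batch_count - 1
                   then indices0 ++ [batch_count - 1] else indices0
    -- the for-loop scattering into sparse_labels; sparse_labels[i] = v is List.set at i.toNat
    -- (exact: every i ∈ indices satisfies 0 ≤ i < batch_count = length of the list)
    let sparse := indices.foldl
      (fun acc i => acc.set i.toNat
        (if i < (labels.length : Int) then (PySem.List.pyGet? labels i).getD "" else PySem.Int.toStr i))
      (List.replicate batch_count.toNat "")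
    (positions, sparse)

-- ===== PORT B =====
-- text_at(i): the guarded label lookup (exact: called only with 0 ≤ i, so pyGet? is some)
def pvTextAt (labels : List String) (i : Int) : String :=
  if i < (labels.length : Int) then (PySem.List.pyGet? labels i).getD "" else PySem.Int.toStr i

-- the while-loop of B, ported with fuel (bc.toNat iterations always suffice since step ≥ 1)
def pvEmitSegs (bc step : Int) (labels : List String) : Int → Nat → List String
  | _, 0 => []
  | i, fuel + 1 =>
    if i < bc then
      pvTextAt labels i ::
        (List.replicate ((min step (bc - i)).toNat - 1) "" ++ pvEmitSegs bc step labels (i + step) fuel)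
    else []

def choose_sparse_xticks_py_alt (batch_count : Int) (labels : List String) : List Int × List String :=
  let positions := PySem.List.pyRange 0 batch_count 1
  if batch_count ≤ 20 then
    (positions, labels)
  else
    let step := max 1 (PySem.Int.floordiv batch_count 15)
    let out := pvEmitSegs batch_count step labels 0 batch_count.toNat
    -- out[-1] = text_at(batch_count-1): out is nonempty here, so index -1 is slot length-1
    let out' := if PySem.Int.mod (batch_count - 1) step ≠ 0
                then out.set (out.length - 1) (pvTextAt labels (batch_count - 1)) else out
    (positions, out')

-- ===== PRECONDITION & SPEC =====
def Spec_choose_sparse_xticks_py (batch_count : Int) (labels : List String) (out : List Int × List String) : Prop := out = choose_sparse_xticks_py_alt batch_count labels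
instance (batch_count : Int) (labels : List String) (out : List Int × List String) : Decidable (Spec_choose_sparse_xticks_py batch_count labels out) := by unfold Spec_choose_sparse_xticks_py; infer_instance

-- ===== CLAIM (what is proved, stated in full; the proofs are below) =====
def Claim_equal_choose_sparse_xticks_py : Prop := ∀ (batch_count : Int) (labels : List String), Dom_choose_sparse_xticks_py batch_count labels → Spec_choose_sparse_xticks_py batch_count labels (choose_sparse_xticks_py batch_count labels)

-- ===== LEMMAS AND PROOFS =====

-- value read at a position of A's scatter loop: later writes win, and since the written value
-- is a function of the position alone, any write at position j stores f ↑j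
theorem foldl_set_getElem? {f : Int → String} (inds : List Int) (init : List String)
    (h : ∀ i ∈ inds, 0 ≤ i ∧ i.toNat < init.length) (j : Nat) :
    (inds.foldl (fun acc i => acc.set i.toNat (f i)) init)[j]? =
      if (j : Int) ∈ inds then (if j < init.length then some (f j) else none) else init[j]? := by
  induction inds generalizing init with
  | nil => simp
  | cons i rest ih =>
    have hi := h i List.mem_cons_self
    have hrest : ∀ x ∈ rest, 0 ≤ x ∧ x.toNat < (init.set i.toNat (f i)).length := by
      intro x hx
      simpa using h x (List.mem_cons_of_mem _ hx)
    rw [List.foldl_cons, ih _ hrest]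
    simp only [List.mem_cons, List.length_set]
    by_cases hjr : (j : Int) ∈ rest
    · simp [hjr]
    · by_cases hji : (j : Int) = i
      · cases hji
        have hlt : j < init.length := by simpa using hi.2
        simp [hjr, hlt]
      · have hne : i.toNat ≠ j := by omega
        simp [hjr, hji, List.getElem?_set_ne hne]

-- membership in A's index list, for positions inside the range
theorem mem_indices_iff (n step j : Int) (hn : 20 < n) (hs : 0 < step)
    (hj0 : 0 ≤ j) (hjn : j < n) :
    (j ∈ (if ((PySem.List.pyRange 0 n step).getLast?.getD 0) ≠ n - 1
          then PySem.List.pyRange 0 n step ++ [n - 1] else PySem.List.pyRange 0 n step))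
      ↔ (step ∣ j ∨ j = n - 1) := by
  have hmem : ∀ x : Int, x ∈ PySem.List.pyRange 0 n step ↔ 0 ≤ x ∧ x < n ∧ step ∣ x := by
    intro x
    have h := PySem.List.mem_pyRange_iff_of_pos (a := 0) (b := n) hs x
    simpa using h
  split_ifs with hlast
  · constructor
    · intro hm
      rcases List.mem_append.1 hm with hm | hm
      · exact Or.inl ((hmem j).1 hm).2.2
      · exact Or.inr (by simpa using hm)
    · rintro (hd | rfl)
      · exact List.mem_append_left _ ((hmem j).2 ⟨hj0, hjn, hd⟩)
      · exact List.mem_append_right _ (by simp)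
  · simp only [ne_eq, not_not] at hlast
    constructor
    · intro hm
      exact Or.inl ((hmem j).1 hm).2.2
    · rintro (hd | rfl)
      · exact (hmem j).2 ⟨hj0, hjn, hd⟩
      · -- n - 1 is the last element of the range, hence a member
        have hne : PySem.List.pyRange 0 n step ≠ [] := by
          intro hnil
          have : (0 : Int) ∈ PySem.List.pyRange 0 n step := (hmem 0).2 ⟨le_refl _, by omega, dvd_zero _⟩
          simp [hnil] at this
        obtain ⟨x, hx⟩ := Option.isSome_iff_exists.1 (List.getLast?_isSome.2 hne)
        have hxmem : x ∈ PySem.List.pyRange 0 n step := List.mem_of_getLast? hx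
        have hxval : x = n - 1 := by rw [hx] at hlast; simpa using hlast
        exact hxval ▸ hxmem

-- A's sparse list, characterised elementwise as a map over all positions
set_option maxRecDepth 4096 in
theorem scatter_eq_map (bc step : Int) (labels : List String) (hbc : 20 < bc) (hs : 0 < step) :
    ((if ((PySem.List.pyRange 0 bc step).getLast?.getD 0) ≠ bc - 1
      then PySem.List.pyRange 0 bc step ++ [bc - 1] else PySem.List.pyRange 0 bc step).foldl
      (fun acc i => acc.set i.toNat
        (if i < (labels.length : Int) then (PySem.List.pyGet? labels i).getD "" else PySem.Int.toStr i))
      (List.replicate bc.toNat "")) =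
    (PySem.List.pyRange 0 bc 1).map (fun i =>
      if PySem.Int.mod i step = 0 ∨ i = bc - 1 then pvTextAt labels i else "") := by
  set inds := (if ((PySem.List.pyRange 0 bc step).getLast?.getD 0) ≠ bc - 1
      then PySem.List.pyRange 0 bc step ++ [bc - 1] else PySem.List.pyRange 0 bc step) with hinds
  have hmem : ∀ x : Int, x ∈ PySem.List.pyRange 0 bc step ↔ 0 ≤ x ∧ x < bc ∧ step ∣ x := by
    intro x
    have h := PySem.List.mem_pyRange_iff_of_pos (a := 0) (b := bc) hs x
    simpa using h
  have hb : ∀ i ∈ inds, 0 ≤ i ∧ i.toNat < (List.replicate bc.toNat ("" : String)).length := by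
    intro i hi
    have hbnd : 0 ≤ i ∧ i < bc := by
      rw [hinds] at hi
      split_ifs at hi with h
      · rcases List.mem_append.1 hi with h2 | h2
        · exact ⟨((hmem i).1 h2).1, ((hmem i).1 h2).2.1⟩
        · have : i = bc - 1 := by simpa using h2
          omega
      · exact ⟨((hmem i).1 hi).1, ((hmem i).1 hi).2.1⟩
    simp only [List.length_replicate]
    omega
  have hbceq : bc = (bc.toNat : Int) := by omega
  apply List.ext_getElem?
  intro j
  have hA := foldl_set_getElem? (f := fun i => pvTextAt labels i) inds _ hb j
  simp only [pvTextAt] at hA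
  rw [hA]
  by_cases hj : j < bc.toNat
  · have hjint : (j : Int) < bc := by omega
    have hB : ((PySem.List.pyRange 0 bc 1).map (fun i =>
        if PySem.Int.mod i step = 0 ∨ i = bc - 1 then pvTextAt labels i else ""))[j]? =
        some (if PySem.Int.mod (j : Int) step = 0 ∨ (j : Int) = bc - 1 then pvTextAt labels j else "") := by
      rw [hbceq]
      exact PySem.List.getElem?_map_pyRange_zero _ bc.toNat j hj
    rw [hB, hinds]
    have hiff : ((j:Int) ∈ (if ((PySem.List.pyRange 0 bc step).getLast?.getD 0) ≠ bc - 1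
          then PySem.List.pyRange 0 bc step ++ [bc - 1] else PySem.List.pyRange 0 bc step))
        ↔ (PySem.Int.mod (j:Int) step = 0 ∨ (j:Int) = bc - 1) := by
      rw [mem_indices_iff bc step j hbc hs (by omega) hjint, PySem.Int.mod_eq_zero_iff_dvd]
    rw [if_congr hiff rfl rfl]
    have hlen : j < (List.replicate bc.toNat ("" : String)).length := by
      simp only [List.length_replicate]; omega
    by_cases h1 : PySem.Int.mod (↑j) step = 0 ∨ (j : Int) = bc - 1
    · rw [if_pos h1, if_pos h1, if_pos hlen]; rfl
    · rw [if_neg h1, if_neg h1, List.getElem?_replicate]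
      simp only [List.length_replicate] at hlen ⊢
      rw [if_pos hlen]
  · have hnm : ¬ ((j : Int) ∈ inds) := by
      intro hmem2
      have := hb _ hmem2
      simp only [List.length_replicate] at this
      omega
    rw [if_neg hnm, List.getElem?_eq_none (by simpa using Nat.le_of_not_lt hj),
      List.getElem?_eq_none]
    simp only [List.length_map]
    rw [hbceq, PySem.List.length_pyRange_one]
    omega

-- a stretch of positions none of which is on the step grid maps to blanks
theorem map_grid_blanks (step : Int) (labels : List String) (n : Nat) :
    ∀ a : Int, (∀ j : Int, a ≤ j → j < a + n → ¬ step ∣ j) →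
    ((PySem.List.pyRange a (a + n) 1).map (fun i =>
        if PySem.Int.mod i step = 0 then pvTextAt labels i else "")) =
      List.replicate n "" := by
  induction n with
  | zero => intro a _; simp [PySem.List.pyRange_one_eq_nil]
  | succ n ih =>
    intro a hblk
    have hcons : PySem.List.pyRange a (a + (n + 1 : Nat)) 1
        = a :: PySem.List.pyRange (a + 1) (a + (n + 1 : Nat)) 1 :=
      PySem.List.pyRange_one_cons (by push_cast; omega)
    have hshift : (a : Int) + (n + 1 : Nat) = (a + 1) + n := by push_cast; omega
    have hga : PySem.Int.mod a step ≠ 0 := fun h =>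
      hblk a le_rfl (by push_cast; omega) ((PySem.Int.mod_eq_zero_iff_dvd a step).1 h)
    rw [hcons, List.map_cons, if_neg hga, hshift,
      ih (a + 1) (fun j h1 h2 => hblk j (by omega) (by push_cast at h2 ⊢; omega)),
      List.replicate_succ]

-- B's while-loop, characterised as a map over the remaining positions
theorem emit_eq_map (bc step : Int) (labels : List String) (hs : 0 < step) :
    ∀ (fuel : Nat) (i : Int), 0 ≤ i → step ∣ i → (bc - i).toNat ≤ fuel →
    pvEmitSegs bc step labels i fuel =
      (PySem.List.pyRange i bc 1).map (fun j =>
        if PySem.Int.mod j step = 0 then pvTextAt labels j else "") := by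
  intro fuel
  induction fuel with
  | zero =>
    intro i _ _ hf
    rw [pvEmitSegs, PySem.List.pyRange_one_eq_nil (by omega)]
    simp
  | succ fuel ih =>
    intro i hi0 hdvd hf
    rw [pvEmitSegs]
    by_cases hib : i < bc
    · rw [if_pos hib]
      have hm1 : i ≤ min (i + step) bc := by omega
      have hm2 : min (i + step) bc ≤ bc := by omega
      have hgi : PySem.Int.mod i step = 0 := (PySem.Int.mod_eq_zero_iff_dvd i step).2 hdvd
      -- the blank stretch between this tick and the next one (or the end)
      have hnlen : min (i + step) bc = (i + 1) + ((min step (bc - i)).toNat - 1 : Nat) := by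
        omega
      have hblanks : ((PySem.List.pyRange (i + 1) (min (i + step) bc) 1).map (fun j =>
          if PySem.Int.mod j step = 0 then pvTextAt labels j else "")) =
          List.replicate ((min step (bc - i)).toNat - 1) "" := by
        rw [hnlen]
        apply map_grid_blanks
        intro j h1 h2 hdj
        have hsub : step ∣ (j - i) := Int.dvd_sub hdj hdvd
        have hlt : j - i < step := by push_cast at h2; omega
        have hpos : 0 < j - i := by omega
        have := Int.le_of_dvd hpos hsub
        omega
      -- the remaining segments are the rest of the positions
      have htail : pvEmitSegs bc step labels (i + step) fuel =
          (PySem.List.pyRange (min (i + step) bc) bc 1).map (fun j =>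
            if PySem.Int.mod j step = 0 then pvTextAt labels j else "") := by
        rw [ih (i + step) (by omega) (dvd_add hdvd dvd_rfl) (by omega)]
        rcases (show i + step ≤ bc ∨ bc < i + step by omega) with h | h
        · rw [min_eq_left h]
        · rw [min_eq_right (le_of_lt h),
            PySem.List.pyRange_one_eq_nil (le_of_lt h),
            PySem.List.pyRange_one_eq_nil le_rfl]
      rw [PySem.List.pyRange_one_append i (min (i + step) bc) bc hm1 hm2, List.map_append,
        PySem.List.pyRange_one_cons (show i < min (i + step) bc by omega), List.map_cons,
        if_pos hgi, hblanks, htail, List.cons_append]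
    · rw [if_neg hib, PySem.List.pyRange_one_eq_nil (by omega)]
      simp

-- the last-slot fix-up turns B's grid map into A's grid-or-last map
set_option maxRecDepth 4096 in
theorem fixup_eq (bc step : Int) (labels : List String) (hbc : 20 < bc) :
    (if PySem.Int.mod (bc - 1) step ≠ 0
     then (((PySem.List.pyRange 0 bc 1).map (fun j =>
            if PySem.Int.mod j step = 0 then pvTextAt labels j else "")).set
            (((PySem.List.pyRange 0 bc 1).map (fun j =>
              if PySem.Int.mod j step = 0 then pvTextAt labels j else "")).length - 1)
            (pvTextAt labels (bc - 1)))
     else ((PySem.List.pyRange 0 bc 1).map (fun j =>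
            if PySem.Int.mod j step = 0 then pvTextAt labels j else ""))) =
    (PySem.List.pyRange 0 bc 1).map (fun i =>
      if PySem.Int.mod i step = 0 ∨ i = bc - 1 then pvTextAt labels i else "") := by
  have hbceq : bc = (bc.toNat : Int) := by omega
  by_cases hmod : PySem.Int.mod (bc - 1) step = 0
  · rw [if_neg (by simpa using hmod)]
    apply List.map_congr_left
    intro j hj
    have hjb : 0 ≤ j ∧ j < bc := PySem.List.mem_pyRange_one.mp hj
    by_cases h0 : PySem.Int.mod j step = 0
    · rw [if_pos h0, if_pos (Or.inl h0)]
    · by_cases hlast : j = bc - 1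
      · exact absurd (hlast ▸ hmod) h0
      · rw [if_neg h0, if_neg (by tauto)]
  · rw [if_pos hmod]
    have hlen : ((PySem.List.pyRange 0 bc 1).map (fun j =>
        if PySem.Int.mod j step = 0 then pvTextAt labels j else "")).length = bc.toNat := by
      rw [List.length_map, PySem.List.length_pyRange_one]
      omega
    apply List.ext_getElem?
    intro k
    rw [List.getElem?_set, hlen]
    by_cases hk : k < bc.toNat
    · have hL : ((PySem.List.pyRange 0 bc 1).map (fun j =>
          if PySem.Int.mod j step = 0 then pvTextAt labels j else ""))[k]? =
          some (if PySem.Int.mod (k : Int) step = 0 then pvTextAt labels k else "") := by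
        rw [hbceq]; exact PySem.List.getElem?_map_pyRange_zero _ bc.toNat k hk
      have hR : ((PySem.List.pyRange 0 bc 1).map (fun i =>
          if PySem.Int.mod i step = 0 ∨ i = bc - 1 then pvTextAt labels i else ""))[k]? =
          some (if PySem.Int.mod (k : Int) step = 0 ∨ (k : Int) = bc - 1
                then pvTextAt labels k else "") := by
        rw [hbceq]; exact PySem.List.getElem?_map_pyRange_zero _ bc.toNat k hk
      rw [hL, hR]
      by_cases hke : bc.toNat - 1 = k
      · have hki : (k : Int) = bc - 1 := by omega
        rw [if_pos hke, if_pos (show bc.toNat - 1 < bc.toNat by omega),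
          if_pos (Or.inr hki), hki]
      · have hki : (k : Int) ≠ bc - 1 := by omega
        rw [if_neg hke]
        by_cases h0 : PySem.Int.mod (k : Int) step = 0
        · rw [if_pos h0, if_pos (Or.inl h0)]
        · rw [if_neg h0, if_neg (by tauto)]
    · have hk1 : ¬ (bc.toNat - 1 = k) := by omega
      rw [if_neg hk1, List.getElem?_eq_none (by rw [hlen]; omega),
        List.getElem?_eq_none (by rw [List.length_map, PySem.List.length_pyRange_one]; omega)]

-- ===== VERDICT (by name: the statement is the Claim_ definition above) =====
theorem choose_sparse_xticks_py_spec : Claim_equal_choose_sparse_xticks_py := by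
  intro bc labels _
  unfold Spec_choose_sparse_xticks_py choose_sparse_xticks_py choose_sparse_xticks_py_alt
  by_cases hbc : bc ≤ 20
  · simp only [if_pos hbc]
  · simp only [if_neg hbc]
    have hbc' : 20 < bc := by omega
    have hs : 0 < max 1 (PySem.Int.floordiv bc 15) := by positivity
    rw [scatter_eq_map bc (max 1 (PySem.Int.floordiv bc 15)) labels hbc' hs,
      emit_eq_map bc (max 1 (PySem.Int.floordiv bc 15)) labels hs bc.toNat 0 le_rfl
        (dvd_zero _) (by omega),
      fixup_eq bc (max 1 (PySem.Int.floordiv bc 15)) labels hbc']
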